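-- pv_equiv track=rewrite | github.com/AdamSlack/Advent-Of-Code | 2023/02/main.py | calculate_game_powers
-- ===== SOURCE A (Python) =====
-- def calculate_minimum_bag_contents(games):
--   minimum_bag_contents = {}
--   for game in games:
--     minimum_bag_contents[game] = {}
--     for round in games[game]:
--       for colour in round:
--         if colour not in minimum_bag_contents[game]:
--           minimum_bag_contents[game][colour] = round[colour]
--         elif round[colour] > minimum_bag_contents[game][colour]:
--           minimum_bag_contents[game][colour] = round[colour]
--   return minimum_bag_contents
--
-- def calculate_game_powers(games):
--   minimum_bag_contents = calculate_minimum_bag_contents(games)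
--   game_powers = []
--   for game in minimum_bag_contents:
--     game_power = 1
--     for colour in minimum_bag_contents[game]:
--       game_power *= minimum_bag_contents[game][colour]
--     game_powers.append(game_power)
--
--   return sum(game_powers)
-- ===== SOURCE B (Python) =====
-- def calculate_game_powers(games):
--   total = 0
--   for rounds in games.values():
--     power = 1
--     seen = set()
--     for rnd in rounds:
--       for colour in rnd:
--         if colour not in seen:
--           seen.add(colour)
--           power *= max(r[colour] for r in rounds if colour in r)
--     total += power
--   return total
-- ===== Notes on version B (the rewrite author's own statement) =====
-- stated objective: alternative
-- what changed: Drops A's per-game maxima table entirely: B keeps only a seen-set and, at each colour's first occurrence, rescans the game's rounds with max() over the rounds containing that colour, accumulating the product and total directly instead of building A's game->colour->max dict and multiplying it in separate passes.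
import Mathlib
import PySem

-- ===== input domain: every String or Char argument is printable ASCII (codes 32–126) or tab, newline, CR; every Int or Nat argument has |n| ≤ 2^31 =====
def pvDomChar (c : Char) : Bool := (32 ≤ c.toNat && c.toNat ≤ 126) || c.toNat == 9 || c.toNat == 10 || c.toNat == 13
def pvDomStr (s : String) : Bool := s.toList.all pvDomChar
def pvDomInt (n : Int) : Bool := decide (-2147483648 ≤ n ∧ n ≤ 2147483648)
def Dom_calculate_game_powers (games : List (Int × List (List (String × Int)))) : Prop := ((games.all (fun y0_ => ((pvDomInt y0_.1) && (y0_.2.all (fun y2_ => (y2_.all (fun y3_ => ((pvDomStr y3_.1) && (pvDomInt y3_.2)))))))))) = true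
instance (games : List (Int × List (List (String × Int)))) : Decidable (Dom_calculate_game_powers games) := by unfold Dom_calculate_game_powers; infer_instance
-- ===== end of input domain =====

-- B drops A's per-game colour→max table: it keeps only a seen-set and, at each colour's first
-- occurrence, rescans the game's rounds with max() over those containing it (objective: alternative).

-- ===== PORT A =====
-- shared input conversion: the Python argument is dict[int, list[dict[str, int]]]; both ports
-- rebuild the dicts from the association lists with Python's overwrite semantics.
def pvToDict (games : List (Int × List (List (String × Int)))) :
    PySem.Dict Int (List (PySem.Dict String Int)) :=
  PySem.Dict.ofList (games.map (fun p => (p.1, p.2.map (fun r => PySem.Dict.ofList r))))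

-- body of A's innermost loop ('for colour in round: …')
def pvColourStep (game : Int) (round : PySem.Dict String Int)
    (mbc : PySem.Dict Int (PySem.Dict String Int)) (colour : String) :
    PySem.Dict Int (PySem.Dict String Int) :=
  let inner := mbc.getD game PySem.Dict.empty
  let v := round.getD colour 0   -- round[colour]: colour is iterated from round, so present
  if !(inner.contains colour) then mbc.insert game (inner.insert colour v)
  else if v > inner.getD colour 0 then mbc.insert game (inner.insert colour v)
  else mbc

def pvMinBag (games : List (Int × List (List (String × Int)))) :
    PySem.Dict Int (PySem.Dict String Int) :=
  let gd := pvToDict games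
  gd.keys.foldl (fun mbc game =>
    (gd.getD game []).foldl (fun mbc round =>
        round.keys.foldl (pvColourStep game round) mbc)
      (mbc.insert game PySem.Dict.empty))
    PySem.Dict.empty

def calculate_game_powers (games : List (Int × List (List (String × Int)))) : Int :=
  let mbc := pvMinBag games
  let game_powers := mbc.keys.foldl (fun gp game =>
    gp ++ [(mbc.getD game PySem.Dict.empty).keys.foldl
             (fun p colour => p * (mbc.getD game PySem.Dict.empty).getD colour 0) 1])
    ([] : List Int)
  game_powers.foldl (fun a b => a + b) 0

-- ===== PORT B =====
-- max(r[colour] for r in rounds if colour in r): colour always occurs in some round at the call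
-- sites, so the list is nonempty and the .getD 0 default is unreachable
def pvColourMax (rounds : List (PySem.Dict String Int)) (c : String) : Int :=
  (PySem.List.max? ((rounds.filter (fun r => r.contains c)).map (fun r => r.getD c 0))
    (fun x => x)).getD 0

def calculate_game_powers_alt (games : List (Int × List (List (String × Int)))) : Int :=
  let gd := pvToDict games
  gd.values.foldl (fun total rounds =>
    let st := rounds.foldl (fun (st : Int × PySem.Set String) rnd =>
      rnd.keys.foldl (fun (st : Int × PySem.Set String) c =>
        if PySem.Set.contains st.2 c then st
        else (st.1 * pvColourMax rounds c, PySem.Set.add st.2 c)) st) ((1 : Int), PySem.Set.empty)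
    total + st.1) 0

-- ===== PRECONDITION & SPEC =====
def Spec_calculate_game_powers (games : List (Int × List (List (String × Int)))) (out : Int) : Prop := out = calculate_game_powers_alt games
instance (games : List (Int × List (List (String × Int)))) (out : Int) : Decidable (Spec_calculate_game_powers games out) := by unfold Spec_calculate_game_powers; infer_instance

-- ===== CLAIM (what is proved, stated in full; the proofs are below) =====
def Claim_equal_calculate_game_powers : Prop := ∀ (games : List (Int × List (List (String × Int)))), Dom_calculate_game_powers games → Spec_calculate_game_powers games (calculate_game_powers games)

-- ===== LEMMAS AND PROOFS =====

-- the per-colour step of A's maxima loop, read over a round's keys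
def pvLStep (round : PySem.Dict String Int) (m : PySem.Dict String Int) (c : String) :
    PySem.Dict String Int :=
  m.insert c (max (m.getD c (round.getD c 0)) (round.getD c 0))

-- the per-game maxima dict A builds, as a fold over the rounds' keys
def pvMax (rounds : List (PySem.Dict String Int)) : PySem.Dict String Int :=
  rounds.foldl (fun m rd => rd.keys.foldl (pvLStep rd) m) PySem.Dict.empty

-- the same step read over (colour, count) pairs
def pvAStep (m : PySem.Dict String Int) (p : String × Int) : PySem.Dict String Int :=
  m.insert p.1 (max (m.getD p.1 p.2) p.2)

-- running max of a value list merged into an optional running max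
def pvComb : Option Int → List Int → Option Int
  | none, [] => none
  | none, v :: vs => some (vs.foldl max v)
  | some w, vs => some (vs.foldl max w)

-- re-inserting the value a key already has changes nothing
theorem pv_insert_getD_self {κ ν : Type} [BEq κ] [LawfulBEq κ] (d : PySem.Dict κ ν) (k : κ)
    (d0 : ν) (hN : d.keys.Nodup) (hc : d.contains k = true) :
    d.insert k (d.getD k d0) = d := by
  apply PySem.Dict.ext
  rw [PySem.Dict.items_insert_of_contains _ _ hc]
  have h : ∀ p ∈ d.items, (if (p.1 == k) = true then (k, d.getD k d0) else p) = p := by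
    rintro ⟨a, b⟩ hp
    by_cases hk : (a == k) = true
    · simp only [hk, if_true]
      have hak : a = k := by simpa using hk
      subst hak
      have hg := PySem.Dict.get?_of_mem_items d hp hN
      have := PySem.Dict.getD_of_get?_eq_some d d0 hg
      simp [this]
    · simp [hk]
  calc List.map (fun p => if (p.1 == k) = true then (k, d.getD k d0) else p) d.items
      = d.items.map id := List.map_congr_left (by simpa using h)
    _ = d.items := List.map_id d.items

-- A's per-colour step only rewrites the entry of the current game, with the max-update
theorem pv_colourStep_localize (game : Int) (rd : PySem.Dict String Int)
    (mbc : PySem.Dict Int (PySem.Dict String Int)) (c : String)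
    (hN : mbc.keys.Nodup) (hc : mbc.contains game = true)
    (hI : (mbc.getD game PySem.Dict.empty).keys.Nodup) :
    pvColourStep game rd mbc c
      = mbc.insert game (pvLStep rd (mbc.getD game PySem.Dict.empty) c) := by
  unfold pvColourStep pvLStep
  by_cases hcc : (mbc.getD game PySem.Dict.empty).contains c = true
  · obtain ⟨cur, hcur⟩ : ∃ cur, (mbc.getD game PySem.Dict.empty).get? c = some cur := by
      have h1 := PySem.Dict.contains_eq_isSome_get? (mbc.getD game PySem.Dict.empty) c
      rw [hcc] at h1
      cases h2 : (mbc.getD game PySem.Dict.empty).get? c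
      · rw [h2] at h1; simp at h1
      · exact ⟨_, rfl⟩
    have h0 : (mbc.getD game PySem.Dict.empty).getD c 0 = cur :=
      PySem.Dict.getD_of_get?_eq_some _ _ hcur
    have hvv : (mbc.getD game PySem.Dict.empty).getD c (rd.getD c 0) = cur :=
      PySem.Dict.getD_of_get?_eq_some _ _ hcur
    simp only [hcc, Bool.not_true, h0, hvv]
    by_cases hgt : rd.getD c 0 > cur
    · rw [max_eq_right (le_of_lt hgt)]
      simp [hgt]
    · rw [max_eq_left (le_of_not_gt hgt)]
      have h3 : (mbc.getD game PySem.Dict.empty).insert c cur = mbc.getD game PySem.Dict.empty := by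
        conv_lhs => rw [← hvv]
        exact pv_insert_getD_self _ _ _ hI hcc
      rw [h3, pv_insert_getD_self _ _ _ hN hc]
      simp [hgt]
  · have hcc' : (mbc.getD game PySem.Dict.empty).contains c = false := by simpa using hcc
    have h4 : (mbc.getD game PySem.Dict.empty).getD c (rd.getD c 0) = rd.getD c 0 :=
      PySem.Dict.getD_of_not_contains _ _ hcc'
    simp only [hcc', Bool.not_false, h4, max_self]
    simp

theorem pv_nodup_lstep_fold (cs : List String) (rd m : PySem.Dict String Int)
    (h : m.keys.Nodup) : (cs.foldl (pvLStep rd) m).keys.Nodup :=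
  PySem.Dict.nodup_keys_foldl_insert cs (fun m c => max (m.getD c (rd.getD c 0)) (rd.getD c 0)) m h

-- A's inner colour loop, localized to the current game's entry
theorem pv_coloursFold_localize (cs : List String) (game : Int) (rd : PySem.Dict String Int)
    (mbc : PySem.Dict Int (PySem.Dict String Int))
    (hN : mbc.keys.Nodup) (hc : mbc.contains game = true)
    (hI : (mbc.getD game PySem.Dict.empty).keys.Nodup) :
    cs.foldl (pvColourStep game rd) mbc
      = mbc.insert game (cs.foldl (pvLStep rd) (mbc.getD game PySem.Dict.empty)) := by
  induction cs generalizing mbc with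
  | nil => exact (pv_insert_getD_self _ _ _ hN hc).symm
  | cons c cs ih =>
    rw [List.foldl_cons, List.foldl_cons, pv_colourStep_localize game rd mbc c hN hc hI]
    rw [ih (mbc.insert game (pvLStep rd (mbc.getD game PySem.Dict.empty) c))
      (PySem.Dict.nodup_keys_insert _ _ _ hN)
      (PySem.Dict.contains_insert_self _ _ _)
      (by rw [PySem.Dict.getD_insert_self]
          exact PySem.Dict.nodup_keys_insert _ _ _ hI)]
    rw [PySem.Dict.getD_insert_self, PySem.Dict.insert_insert_self]

-- A's rounds loop, localized to the current game's entry
theorem pv_roundsFold_localize (rds : List (PySem.Dict String Int)) (game : Int)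
    (mbc : PySem.Dict Int (PySem.Dict String Int))
    (hN : mbc.keys.Nodup) (hc : mbc.contains game = true)
    (hI : (mbc.getD game PySem.Dict.empty).keys.Nodup) :
    rds.foldl (fun mbc rd => rd.keys.foldl (pvColourStep game rd) mbc) mbc
      = mbc.insert game
          (rds.foldl (fun m rd => rd.keys.foldl (pvLStep rd) m) (mbc.getD game PySem.Dict.empty)) := by
  induction rds generalizing mbc with
  | nil => exact (pv_insert_getD_self _ _ _ hN hc).symm
  | cons rd rds ih =>
    rw [List.foldl_cons, List.foldl_cons,
      pv_coloursFold_localize rd.keys game rd mbc hN hc hI]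
    rw [ih (mbc.insert game (rd.keys.foldl (pvLStep rd) (mbc.getD game PySem.Dict.empty)))
      (PySem.Dict.nodup_keys_insert _ _ _ hN)
      (PySem.Dict.contains_insert_self _ _ _)
      (by rw [PySem.Dict.getD_insert_self]
          exact pv_nodup_lstep_fold _ _ _ hI)]
    rw [PySem.Dict.getD_insert_self, PySem.Dict.insert_insert_self]

-- the outer games loop is an insert-per-fresh-key loop of the local maxima dicts
theorem pv_outer_fold (gd : PySem.Dict Int (List (PySem.Dict String Int)))
    (gl : List Int) (mbc : PySem.Dict Int (PySem.Dict String Int)) (hN : mbc.keys.Nodup) :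
    gl.foldl (fun mbc game =>
        (gd.getD game []).foldl (fun mbc round => round.keys.foldl (pvColourStep game round) mbc)
          (mbc.insert game PySem.Dict.empty)) mbc
      = gl.foldl (fun mbc g => mbc.insert g (pvMax (gd.getD g []))) mbc := by
  induction gl generalizing mbc with
  | nil => rfl
  | cons g gl ih =>
    rw [List.foldl_cons, List.foldl_cons]
    rw [pv_roundsFold_localize (gd.getD g []) g (mbc.insert g PySem.Dict.empty)
      (PySem.Dict.nodup_keys_insert _ _ _ hN)
      (PySem.Dict.contains_insert_self _ _ _)
      (by rw [PySem.Dict.getD_insert_self]; simp [PySem.Dict.keys, PySem.Dict.empty])]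
    rw [PySem.Dict.getD_insert_self, PySem.Dict.insert_insert_self]
    exact ih _ (PySem.Dict.nodup_keys_insert _ _ _ hN)

theorem pv_gd_nodup (games : List (Int × List (List (String × Int)))) :
    (pvToDict games).keys.Nodup := PySem.Dict.nodup_keys_ofList _

theorem pv_minBag_items (games : List (Int × List (List (String × Int)))) :
    (pvMinBag games).items
      = (pvToDict games).keys.map (fun g => (g, pvMax ((pvToDict games).getD g []))) := by
  unfold pvMinBag
  rw [pv_outer_fold (pvToDict games) (pvToDict games).keys PySem.Dict.empty
    (by simp [PySem.Dict.keys, PySem.Dict.empty])]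
  rw [PySem.Dict.items_foldl_insert_fresh (pvToDict games).keys (fun g => g)
    (fun g => pvMax ((pvToDict games).getD g [])) PySem.Dict.empty
    (by intro a _; simp [PySem.Dict.contains, PySem.Dict.empty])
    (by simpa using pv_gd_nodup games)]
  simp [PySem.Dict.empty]

theorem pv_mem_values_foldl {κ ν : Type} [BEq κ] [LawfulBEq κ] (L : List (κ × ν))
    (d : PySem.Dict κ ν) (v : ν)
    (h : v ∈ (L.foldl (fun acc p => acc.insert p.1 p.2) d).values) :
    v ∈ d.values ∨ v ∈ L.map (·.2) := by
  induction L generalizing d with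
  | nil => exact Or.inl h
  | cons p L ih =>
    rcases ih (d.insert p.1 p.2) (by simpa using h) with h1 | h1
    · rcases PySem.Dict.mem_values_insert d p.1 p.2 v h1 with h2 | h2
      · exact Or.inr (by simp [h2])
      · exact Or.inl h2
    · exact Or.inr (by simp; right; simpa using h1)

theorem pv_mem_values_ofList {κ ν : Type} [BEq κ] [LawfulBEq κ] (L : List (κ × ν)) (v : ν)
    (h : v ∈ (PySem.Dict.ofList L).values) : v ∈ L.map (·.2) := by
  rcases pv_mem_values_foldl L PySem.Dict.empty v h with h1 | h1
  · simp [PySem.Dict.values, PySem.Dict.empty] at h1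
  · exact h1

-- every round dict reachable from the rebuilt games dict has distinct keys
theorem pv_rounds_nodup (games : List (Int × List (List (String × Int))))
    (rs : List (PySem.Dict String Int)) (h : rs ∈ (pvToDict games).values)
    (rd : PySem.Dict String Int) (hrd : rd ∈ rs) : rd.keys.Nodup := by
  have h1 := pv_mem_values_ofList _ _ h
  simp only [List.map_map, List.mem_map] at h1
  obtain ⟨p, _, hp⟩ := h1
  have : rd ∈ p.2.map (fun r => PySem.Dict.ofList r) := by
    rw [show p.2.map (fun r => PySem.Dict.ofList r) = rs from hp]; exact hrd
  obtain ⟨r, _, hr⟩ := List.mem_map.mp this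
  rw [← hr]
  exact PySem.Dict.nodup_keys_ofList r

-- a fold over a flatMap is the nested fold
theorem pv_foldl_flatMap {α β σ : Type} (l : List α) (g : α → List β) (f : σ → β → σ) (a : σ) :
    (l.flatMap g).foldl f a = l.foldl (fun a x => (g x).foldl f a) a := by
  induction l generalizing a with
  | nil => rfl
  | cons x t ih =>
    simp only [List.flatMap_cons, List.foldl_append, List.foldl_cons]
    exact ih _

-- A's maxima dict is the fold of pvAStep over the flattened (colour, count) pairs
theorem pv_max_eq_flat (rs : List (PySem.Dict String Int))
    (hND : ∀ rd ∈ rs, rd.keys.Nodup) :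
    (rs.flatMap (fun rd => rd.items)).foldl pvAStep PySem.Dict.empty = pvMax rs := by
  unfold pvMax
  rw [pv_foldl_flatMap]
  apply PySem.List.foldl_congr_mem
  intro m rd hrd
  rw [PySem.Dict.items_eq_map_keys rd (hND rd hrd) 0, List.foldl_map]
  rfl

-- get? after the pvAStep fold: the running max of the values filed under that colour
theorem pv_get?_fold (pairs : List (String × Int)) (c : String) :
    ∀ m : PySem.Dict String Int,
      (pairs.foldl pvAStep m).get? c
        = pvComb (m.get? c) ((pairs.filter (fun p => p.1 == c)).map (·.2)) := by
  induction pairs with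
  | nil =>
    intro m
    cases hm : m.get? c <;> simp [pvComb, hm]
  | cons p ps ih =>
    intro m
    rw [List.foldl_cons, ih]
    by_cases hp : p.1 = c
    · have hstep : (pvAStep m p).get? c = some (max (m.getD c p.2) p.2) := by
        unfold pvAStep
        rw [hp, PySem.Dict.get?_insert_self]
      rw [hstep, List.filter_cons_of_pos (by simp [hp]), List.map_cons]
      cases hm : m.get? c with
      | none =>
        have h0 : m.getD c p.2 = p.2 := PySem.Dict.getD_of_get?_eq_none _ _ hm
        rw [h0, max_self]
        cases hvs : (ps.filter (fun p => p.1 == c)).map (·.2) <;> rfl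
      | some w =>
        have h0 : m.getD c p.2 = w := PySem.Dict.getD_of_get?_eq_some _ _ hm
        rw [h0]
        cases hvs : (ps.filter (fun p => p.1 == c)).map (·.2) <;> rfl
    · have hstep : (pvAStep m p).get? c = m.get? c := by
        unfold pvAStep
        exact PySem.Dict.get?_insert_of_ne m (max (m.getD p.1 p.2) p.2) (Ne.symm hp)
      rw [hstep, List.filter_cons_of_neg (by simp [hp])]

-- keys after the pvAStep fold: first occurrences of the pair keys
theorem pv_keys_fold (pairs : List (String × Int)) :
    (pairs.foldl pvAStep PySem.Dict.empty).keys
      = PySem.Set.ofList (pairs.map (·.1)) := by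
  unfold pvAStep
  rw [PySem.Dict.keys_foldl_insert_key pairs (·.1)
    (fun m p => max (m.getD p.1 p.2) p.2) PySem.Dict.empty]
  simp [PySem.Dict.keys, PySem.Dict.empty, PySem.Set.update_nil_left]

-- filtering one colour out of a nodup key list
theorem pv_filter_beq_of_nodup (l : List String) (c : String) (h : l.Nodup) :
    l.filter (fun k => k == c) = if c ∈ l then [c] else [] := by
  induction l with
  | nil => simp
  | cons x t ih =>
    simp only [List.nodup_cons] at h
    by_cases hx : x = c
    · subst hx
      have h1 : t.filter (fun k => k == x) = [] :=
        List.filter_eq_nil_iff.2 (fun a ha => by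
          simp only [beq_iff_eq]; rintro rfl; exact h.1 ha)
      simp [h.1, h1]
    · simp [hx, ih h.2, Ne.symm hx]

-- the flattened values filed under a colour are the values of the rounds containing it
theorem pv_vals_eq (rs : List (PySem.Dict String Int))
    (hND : ∀ rd ∈ rs, rd.keys.Nodup) (c : String) :
    ((rs.flatMap (fun rd => rd.items)).filter (fun p => p.1 == c)).map (·.2)
      = (rs.filter (fun r => r.contains c)).map (fun r => r.getD c 0) := by
  induction rs with
  | nil => rfl
  | cons rd rest ih =>
    have hN : rd.keys.Nodup := hND rd (by simp)
    have hhead : ((rd.items.filter (fun p => p.1 == c)).map (·.2))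
        = if rd.contains c then [rd.getD c 0] else [] := by
      rw [PySem.Dict.items_eq_map_keys rd hN 0, List.filter_map]
      have h1 : ((fun p => p.1 == c) ∘ fun k => (k, rd.getD k 0)) = fun k => k == c := rfl
      rw [h1, pv_filter_beq_of_nodup rd.keys c hN]
      by_cases hc : c ∈ rd.keys
      · rw [if_pos hc, if_pos ((PySem.Dict.contains_iff_mem_keys rd c).mpr hc)]
        rfl
      · rw [if_neg hc, if_neg (fun h => hc ((PySem.Dict.contains_iff_mem_keys rd c).mp h))]
        rfl
    rw [List.flatMap_cons, List.filter_append, List.map_append, hhead,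
      ih (fun r hr => hND r (List.mem_cons_of_mem _ hr)), List.filter_cons]
    by_cases hc : rd.contains c = true
    · rw [if_pos hc, if_pos hc, List.map_cons, List.singleton_append]
    · rw [if_neg hc, if_neg hc, List.nil_append]

-- the maxima dict agrees with B's per-colour rescan on every colour that occurs
theorem pv_getD_max (rs : List (PySem.Dict String Int))
    (hND : ∀ rd ∈ rs, rd.keys.Nodup) (c : String)
    (hc : c ∈ rs.flatMap (fun rd => rd.keys)) :
    (pvMax rs).getD c 0 = pvColourMax rs c := by
  rw [← pv_max_eq_flat rs hND, PySem.Dict.getD_eq_get?_getD, pv_get?_fold _ c PySem.Dict.empty,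
    PySem.Dict.get?_empty, pv_vals_eq rs hND c]
  obtain ⟨rd, hrd, hcrd⟩ := List.mem_flatMap.mp hc
  have hne : rs.filter (fun r => r.contains c) ≠ [] := by
    intro h0
    have := List.filter_eq_nil_iff.mp h0 rd hrd
    simp [(PySem.Dict.contains_iff_mem_keys rd c).mpr hcrd] at this
  cases hL : (rs.filter (fun r => r.contains c)).map (fun r => r.getD c 0) with
  | nil => exact absurd (List.map_eq_nil_iff.mp hL) hne
  | cons v vs =>
    unfold pvColourMax
    rw [hL, PySem.List.max?_id_cons]
    rfl

-- a product-scalar slides out of the multiplying fold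
theorem pv_foldl_mul_scalar (f : String → Int) (l : List String) :
    ∀ a b : Int, l.foldl (fun p c => p * f c) (a * b) = a * l.foldl (fun p c => p * f c) b := by
  induction l with
  | nil => intro a b; rfl
  | cons c t ih =>
    intro a b
    simp only [List.foldl_cons, mul_assoc]
    exact ih a (b * f c)

-- B's seen-set loop: the product of f over the first occurrences of the new colours
theorem pv_bfold (f : String → Int) (cs : List String) :
    ∀ (acc : Int) (s : PySem.Set String),
      cs.foldl (fun (st : Int × PySem.Set String) c =>
          if PySem.Set.contains st.2 c then st
          else (st.1 * f c, PySem.Set.add st.2 c)) (acc, s)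
        = (acc * (((PySem.Set.update s cs).drop s.length).foldl (fun a c => a * f c) 1),
           PySem.Set.update s cs) := by
  induction cs with
  | nil =>
    intro acc s
    rw [PySem.Set.update_nil, List.drop_length]
    simp
  | cons c cs ih =>
    intro acc s
    rw [List.foldl_cons, PySem.Set.update_cons]
    by_cases hc : c ∈ s
    · have hb : PySem.Set.contains s c = true := (PySem.Set.contains_iff s c).mpr hc
      simp only [hb, if_true]
      rw [PySem.Set.add_of_mem hc]
      exact ih acc s
    · have hb : PySem.Set.contains s c = false := by
        simpa using fun h => hc ((PySem.Set.contains_iff s c).mp h)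
      simp only [hb, Bool.false_eq_true, if_false]
      rw [PySem.Set.add_of_not_mem hc, ih (acc * f c) (s ++ [c])]
      have hU := PySem.Set.update_eq_append_filter (s ++ [c]) cs
      rw [hU]
      have hd1 : (((s ++ [c]) ++ (PySem.Set.ofList cs).filter
            (fun y => !PySem.Set.contains (s ++ [c]) y)).drop (s ++ [c]).length)
          = (PySem.Set.ofList cs).filter (fun y => !PySem.Set.contains (s ++ [c]) y) :=
        List.drop_left
      have hd2 : (((s ++ [c]) ++ (PySem.Set.ofList cs).filter
            (fun y => !PySem.Set.contains (s ++ [c]) y)).drop s.length)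
          = c :: (PySem.Set.ofList cs).filter (fun y => !PySem.Set.contains (s ++ [c]) y) := by
        rw [List.append_assoc, List.drop_left, List.singleton_append]
      rw [hd1, hd2]
      refine Prod.ext ?_ rfl
      show acc * f c * _ = acc * _
      rw [List.foldl_cons, one_mul]
      have := pv_foldl_mul_scalar f
        ((PySem.Set.ofList cs).filter (fun y => !PySem.Set.contains (s ++ [c]) y)) (f c) 1
      rw [mul_one] at this
      rw [this, mul_assoc]

-- per game: A's product over the maxima dict equals B's first-occurrence rescan product
theorem pv_game_eq (rs : List (PySem.Dict String Int))
    (hND : ∀ rd ∈ rs, rd.keys.Nodup) :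
    (pvMax rs).keys.foldl (fun p c => p * (pvMax rs).getD c 0) 1
      = (rs.foldl (fun (st : Int × PySem.Set String) rnd =>
          rnd.keys.foldl (fun (st : Int × PySem.Set String) c =>
            if PySem.Set.contains st.2 c then st
            else (st.1 * pvColourMax rs c, PySem.Set.add st.2 c)) st)
          ((1 : Int), PySem.Set.empty)).1 := by
  rw [← pv_foldl_flatMap rs (fun rd => rd.keys)
    (fun (st : Int × PySem.Set String) c =>
      if PySem.Set.contains st.2 c then st
      else (st.1 * pvColourMax rs c, PySem.Set.add st.2 c)) ((1 : Int), PySem.Set.empty)]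
  rw [pv_bfold (pvColourMax rs) (rs.flatMap (fun rd => rd.keys)) 1 PySem.Set.empty]
  have hkeys : (pvMax rs).keys = PySem.Set.ofList (rs.flatMap (fun rd => rd.keys)) := by
    rw [← pv_max_eq_flat rs hND, pv_keys_fold]
    congr 1
    rw [List.map_flatMap]
    rfl
  have he : (PySem.Set.empty : PySem.Set String) = [] := rfl
  simp only [he, PySem.Set.update_nil_left, List.length_nil, List.drop_zero, one_mul]
  rw [← hkeys]
  apply PySem.List.foldl_congr_mem
  intro p c hcK
  have hc : c ∈ rs.flatMap (fun rd => rd.keys) := by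
    rw [hkeys] at hcK
    exact (PySem.Set.mem_ofList _ _).mp hcK
  rw [pv_getD_max rs hND c hc]

-- ===== VERDICT (by name: the statement is the Claim_ definition above) =====
theorem calculate_game_powers_spec : Claim_equal_calculate_game_powers := by
  intro games _
  unfold Spec_calculate_game_powers
  simp only [calculate_game_powers, calculate_game_powers_alt]
  have hgdN := pv_gd_nodup games
  have hitems := pv_minBag_items games
  have hkeys : (pvMinBag games).keys = (pvToDict games).keys := by
    simp only [PySem.Dict.keys, hitems, List.map_map]
    simp
  have hmbcN : (pvMinBag games).keys.Nodup := by rw [hkeys]; exact hgdN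
  have hget : ∀ g ∈ (pvToDict games).keys,
      (pvMinBag games).getD g PySem.Dict.empty = pvMax ((pvToDict games).getD g []) := by
    intro g hg
    exact PySem.Dict.getD_of_mem_items _ (by rw [hitems]; exact List.mem_map_of_mem hg) hmbcN _
  rw [PySem.List.foldl_append_singleton_eq_map, List.nil_append, List.foldl_map, hkeys]
  rw [PySem.Dict.values_eq_map_keys _ hgdN ([] : List (PySem.Dict String Int)), List.foldl_map]
  apply PySem.List.foldl_congr_mem
  intro acc g hg
  have hrs : (pvToDict games).getD g [] ∈ (pvToDict games).values := by
    rw [PySem.Dict.values_eq_map_keys _ hgdN ([] : List (PySem.Dict String Int))]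
    exact List.mem_map_of_mem hg
  rw [hget g hg]
  congr 1
  exact pv_game_eq ((pvToDict games).getD g [])
    (fun rd hrd => pv_rounds_nodup games _ hrs rd hrd)
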